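-- pv_equiv track=rewrite | github.com/enriquedlh97/algoDS | algosds/problems/patterns/miscellaneous/hash_table/generate_document.py | generate_document_hashtable
-- ===== SOURCE A (Python) =====
-- def generate_document_hashtable(characters, document):
--     if len(document) <= len(characters):
--
--         available_characters = {}
--
--         for character in characters:
--
--             if character not in available_characters:
--                 available_characters[character] = 0
--
--             available_characters[character] += 1
--
--         for character in document:
--
--             if character not in available_characters:
--                 return False
--             else:
--                 if available_characters[character] - 1 < 0:
--                     return False
--                 else:
--                     available_characters[character] -= 1
--
--         return True
--
--     else:
--         return False
-- ===== SOURCE B (Python) =====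
-- def generate_document_hashtable(characters, document):
--     # Sort both strings and do a two-pointer merge scan: the sorted document
--     # must appear as a (greedy) subsequence of the sorted character pool.
--     doc = sorted(document)
--     pool = sorted(characters)
--     i = 0
--     j = 0
--     while i < len(doc):
--         if j == len(pool):
--             return False
--         if pool[j] == doc[i]:
--             i += 1
--             j += 1
--         elif pool[j] < doc[i]:
--             j += 1
--         else:
--             return False
--     return True
-- ===== Notes on version B (the rewrite author's own statement) =====
-- stated objective: alternative
-- what changed: Replaces A's hash-table counting with a destructive decrement scan by sorting both strings and running a two-pointer merge scan that checks the sorted document is a greedy subsequence of the sorted character pool (no hash table, no length guard).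
import Mathlib
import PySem

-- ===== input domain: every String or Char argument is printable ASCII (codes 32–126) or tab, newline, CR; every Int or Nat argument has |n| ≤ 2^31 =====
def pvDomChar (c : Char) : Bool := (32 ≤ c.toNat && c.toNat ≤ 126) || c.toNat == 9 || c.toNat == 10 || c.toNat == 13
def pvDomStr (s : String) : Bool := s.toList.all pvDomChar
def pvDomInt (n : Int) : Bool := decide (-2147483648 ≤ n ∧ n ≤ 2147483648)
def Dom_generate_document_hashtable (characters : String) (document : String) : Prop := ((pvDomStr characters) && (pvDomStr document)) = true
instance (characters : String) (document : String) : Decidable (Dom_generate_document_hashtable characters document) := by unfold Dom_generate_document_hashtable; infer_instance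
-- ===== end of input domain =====

-- B sorts both strings and runs a two-pointer merge scan (sorted document as a
-- greedy subsequence of the sorted pool) instead of A's hash-table counting
-- with a destructive decrement scan (objective: alternative).

-- ===== PORT A =====
-- first loop of A: build availability counts (if absent insert 0, then += 1)
def gdBuild (l : List Char) : PySem.Dict Char Int :=
  l.foldl (fun d c =>
    let d1 := if d.contains c then d else d.insert c 0
    d1.insert c (d1.getD c 0 + 1)) PySem.Dict.empty

-- second loop of A: consume each document character, with early return False
def gdScan (d : PySem.Dict Char Int) : List Char → Bool
  | [] => true
  | c :: rest =>
    match d.get? c with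
    | none => false
    | some v => if v - 1 < 0 then false else gdScan (d.insert c (v - 1)) rest

def generate_document_hashtable (characters : String) (document : String) : Bool :=
  if document.toList.length ≤ characters.toList.length then
    gdScan (gdBuild characters.toList) document.toList
  else
    false

-- ===== PORT B =====
-- B's while loop: two pointers over the two sorted lists, as structural
-- recursion on the same state (remaining document, remaining pool)
def gdMerge : List Char → List Char → Bool
  | [], _ => true
  | _ :: _, [] => false
  | d :: ds, p :: ps =>
    if p = d then gdMerge ds ps
    else if p < d then gdMerge (d :: ds) ps
    else false

def generate_document_hashtable_alt (characters : String) (document : String) : Bool :=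
  let doc := PySem.List.sorted document.toList (fun x => x) false
  let pool := PySem.List.sorted characters.toList (fun x => x) false
  gdMerge doc pool

-- ===== PRECONDITION & SPEC =====
def Spec_generate_document_hashtable (characters : String) (document : String) (out : Bool) : Prop := out = generate_document_hashtable_alt characters document
instance (characters : String) (document : String) (out : Bool) : Decidable (Spec_generate_document_hashtable characters document out) := by unfold Spec_generate_document_hashtable; infer_instance

-- ===== CLAIM (what is proved, stated in full; the proofs are below) =====
def Claim_equal_generate_document_hashtable : Prop := ∀ (characters : String) (document : String), Dom_generate_document_hashtable characters document → Spec_generate_document_hashtable characters document (generate_document_hashtable characters document)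

-- ===== LEMMAS AND PROOFS =====

-- A's build loop computes the frequency of each character
theorem gdBuild_getD (l : List Char) (x : Char) :
    (gdBuild l).getD x 0 = (l.count x : Int) := by
  suffices h : ∀ d : PySem.Dict Char Int,
      (l.foldl (fun d c =>
        let d1 := if d.contains c then d else d.insert c 0
        d1.insert c (d1.getD c 0 + 1)) d).getD x 0 = d.getD x 0 + (l.count x : Int) by
    have := h PySem.Dict.empty
    simpa [gdBuild] using this
  induction l with
  | nil => intro d; simp
  | cons c rest ih =>
    intro d
    simp only [List.foldl_cons, ih]
    by_cases hc : d.contains c = true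
    · simp only [hc, if_true]
      rcases eq_or_ne x c with rfl | hx
      · simp; ring
      · simp [PySem.Dict.getD_insert, hx, Ne.symm hx]
    · simp only [hc]
      have h0 : d.getD c 0 = 0 := PySem.Dict.getD_of_not_contains d 0 (by simpa using hc)
      rcases eq_or_ne x c with rfl | hx
      · simp [h0]; ring
      · simp [PySem.Dict.getD_insert, hx, Ne.symm hx]

-- A's scan loop succeeds iff every needed character is sufficiently available
theorem gdScan_iff (l : List Char) :
    ∀ d : PySem.Dict Char Int,
      (gdScan d l = true ↔ ∀ x ∈ l, (l.count x : Int) ≤ d.getD x 0) := by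
  induction l with
  | nil => intro d; simp [gdScan]
  | cons c rest ih =>
    intro d
    cases hv : d.get? c with
    | none =>
      simp only [gdScan, hv]
      constructor
      · intro h; exact absurd h (by simp)
      · intro h
        exfalso
        have h1 := h c (List.mem_cons_self ..)
        rw [PySem.Dict.getD_eq_get?_getD, hv] at h1
        simp only [List.count_cons_self, Option.getD_none] at h1
        push_cast at h1
        omega
    | some v =>
      have hdc : d.getD c 0 = v := PySem.Dict.getD_of_get?_eq_some d 0 hv
      by_cases hneg : v - 1 < 0
      · simp only [gdScan, hv, if_pos hneg]
        constructor
        · intro h; exact absurd h (by simp)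
        · intro h
          exfalso
          have h1 := h c (List.mem_cons_self ..)
          rw [hdc] at h1
          have h2 : 1 ≤ (c :: rest).count c := List.count_pos_iff.mpr (List.mem_cons_self ..)
          omega
      · simp only [gdScan, hv, if_neg hneg]
        rw [ih (d.insert c (v - 1))]
        constructor
        · intro h x hx
          rcases eq_or_ne x c with rfl | hxc
          · rw [hdc, List.count_cons_self]
            by_cases hm : x ∈ rest
            · have h2 := h x hm
              rw [PySem.Dict.getD_insert, if_pos rfl] at h2
              push_cast at h2 ⊢
              omega
            · rw [List.count_eq_zero_of_not_mem hm]
              push_cast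
              omega
          · have hxr : x ∈ rest := by
              rcases List.mem_cons.mp hx with h1 | h1
              · exact absurd h1 hxc
              · exact h1
            have h2 := h x hxr
            rw [PySem.Dict.getD_insert, if_neg hxc] at h2
            rwa [List.count_cons_of_ne (Ne.symm hxc)]
        · intro h x hx
          rw [PySem.Dict.getD_insert]
          rcases eq_or_ne x c with rfl | hxc
          · rw [if_pos rfl]
            have h2 := h x (List.mem_cons_self ..)
            rw [hdc, List.count_cons_self] at h2
            push_cast at h2 ⊢
            omega
          · rw [if_neg hxc]
            have h2 := h x (List.mem_cons_of_mem _ hx)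
            rwa [List.count_cons_of_ne (Ne.symm hxc)] at h2

-- soundness of the merge scan: success means the first list is a sublist
theorem gdMerge_sublist : ∀ (p d : List Char), gdMerge d p = true → d.Sublist p := by
  intro p
  induction p with
  | nil =>
    intro d h
    cases d with
    | nil => exact List.Sublist.refl _
    | cons a as => simp [gdMerge] at h
  | cons q qs ih =>
    intro d h
    cases d with
    | nil => exact List.nil_sublist _
    | cons a as =>
      by_cases hq : q = a
      · subst hq
        rw [gdMerge, if_pos rfl] at h
        exact List.Sublist.cons₂ _ (ih _ h)
      · rw [gdMerge, if_neg hq] at h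
        by_cases hlt : q < a
        · rw [if_pos hlt] at h
          exact List.Sublist.cons _ (ih _ h)
        · rw [if_neg hlt] at h
          exact absurd h (by simp)

-- completeness of the merge scan on sorted lists with sufficient counts
theorem gdMerge_complete : ∀ (p d : List Char),
    d.Pairwise (· ≤ ·) → p.Pairwise (· ≤ ·) →
    (∀ x : Char, d.count x ≤ p.count x) → gdMerge d p = true := by
  intro p
  induction p with
  | nil =>
    intro d _ _ hcnt
    cases d with
    | nil => rfl
    | cons a as =>
      exfalso
      have := hcnt a
      simp at this
  | cons q qs ih =>
    intro d hd hp hcnt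
    cases d with
    | nil => rfl
    | cons a as =>
      rcases lt_trichotomy q a with hlt | heq | hgt
      · -- q < a: q is smaller than everything in a :: as, skip it
        rw [gdMerge, if_neg (ne_of_lt hlt), if_pos hlt]
        refine ih (a :: as) hd hp.tail ?_
        intro x
        rcases eq_or_ne x q with rfl | hxq
        · have hnm : x ∉ a :: as := by
            intro hm
            rcases List.mem_cons.mp hm with rfl | hm'
            · exact absurd hlt (lt_irrefl _)
            · have := (List.pairwise_cons.mp hd).1 x hm'
              exact absurd (lt_of_lt_of_le hlt this) (lt_irrefl _)
          simp [List.count_eq_zero_of_not_mem hnm]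
        · have := hcnt x
          rwa [List.count_cons_of_ne (Ne.symm hxq)] at this
      · -- q = a: match, recurse on both tails
        subst heq
        rw [gdMerge, if_pos rfl]
        refine ih as hd.tail hp.tail ?_
        intro x
        have := hcnt x
        rcases eq_or_ne x q with rfl | hxq
        · simpa using this
        · rwa [List.count_cons_of_ne (Ne.symm hxq), List.count_cons_of_ne (Ne.symm hxq)] at this
      · -- a < q: a cannot occur in q :: qs at all, contradiction
        exfalso
        have hnm : a ∉ q :: qs := by
          intro hm
          rcases List.mem_cons.mp hm with rfl | hm'
          · exact absurd hgt (lt_irrefl _)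
          · have := (List.pairwise_cons.mp hp).1 a hm'
            exact absurd (lt_of_lt_of_le hgt this) (lt_irrefl _)
        have := hcnt a
        rw [List.count_eq_zero_of_not_mem hnm] at this
        simp at this
-- B succeeds iff every needed character is sufficiently available
theorem alt_iff (characters document : String) :
    (generate_document_hashtable_alt characters document = true ↔
      ∀ x : Char, document.toList.count x ≤ characters.toList.count x) := by
  unfold generate_document_hashtable_alt
  have hpd : (PySem.List.sorted document.toList (fun x => x) false).Perm document.toList :=
    PySem.List.sorted_perm ..
  have hpc : (PySem.List.sorted characters.toList (fun x => x) false).Perm characters.toList :=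
    PySem.List.sorted_perm ..
  constructor
  · intro h x
    have hsub := gdMerge_sublist _ _ h
    have := hsub.count_le x
    rwa [hpd.count_eq, hpc.count_eq] at this
  · intro h
    refine gdMerge_complete _ _ ?_ ?_ ?_
    · simpa using PySem.List.sorted_pairwise document.toList (fun x => x)
    · simpa using PySem.List.sorted_pairwise characters.toList (fun x => x)
    · intro x
      rw [hpd.count_eq, hpc.count_eq]
      exact h x

-- the length guard is implied by multiset containment
theorem length_le_of_counts (doc chars : List Char)
    (h : ∀ x : Char, doc.count x ≤ chars.count x) :
    doc.length ≤ chars.length := by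
  have hms : (doc : Multiset Char) ≤ (chars : Multiset Char) := by
    rw [Multiset.le_iff_count]
    intro a
    simpa [Multiset.coe_count] using h a
  simpa using Multiset.card_le_card hms

-- ===== VERDICT (by name: the statement is the Claim_ definition above) =====
theorem generate_document_hashtable_spec : Claim_equal_generate_document_hashtable := by
  intro characters document _
  unfold Spec_generate_document_hashtable
  rw [Bool.eq_iff_iff]
  unfold generate_document_hashtable
  rw [alt_iff]
  by_cases hlen : document.toList.length ≤ characters.toList.length
  · rw [if_pos hlen, gdScan_iff]
    constructor
    · intro h x
      by_cases hx : x ∈ document.toList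
      · have := h x hx
        rw [gdBuild_getD] at this
        exact_mod_cast this
      · simp [List.count_eq_zero_of_not_mem hx]
    · intro h x hx
      rw [gdBuild_getD]
      exact_mod_cast h x
  · rw [if_neg hlen]
    simp only [Bool.false_eq_true, false_iff]
    intro h
    exact hlen (length_le_of_counts _ _ h)
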